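-- pv_equiv track=rewrite | github.com/ovgu-FINken/AdWeRSBAD | adwersbad/class_helpers.py | reduce_a2d2_classes
-- ===== SOURCE A (Python) =====
-- def reduce_a2d2_classes(a2d2_dict):
--     class_list = []
--     class_dict = {}
--     for key, value in a2d2_dict.items():
--         o = value.split(" ")[0]
--         if o not in class_list:
--             class_list.append(o)
--             class_dict[o] = key
--     return class_dict
-- ===== SOURCE B (Python) =====
-- def reduce_a2d2_classes(a2d2_dict):
--     work = [(v.split(" ")[0], k) for k, v in a2d2_dict.items()]
--     out = []
--     while work:
--         w, key = work[0]
--         out.append((w, key))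
--         work = [p for p in work[1:] if p[0] != w]
--     return dict(out)
-- ===== Notes on version B (the rewrite author's own statement) =====
-- stated objective: alternative
-- what changed: Replaces A's single pass with a seen-list and incremental dict inserts by a worklist nub: precompute all (first-word, key) pairs in one mapping pass, then repeatedly pop the head pair and filter every later pair with the same word out of the worklist, and build the dict once from the collected pairs.
import Mathlib
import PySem

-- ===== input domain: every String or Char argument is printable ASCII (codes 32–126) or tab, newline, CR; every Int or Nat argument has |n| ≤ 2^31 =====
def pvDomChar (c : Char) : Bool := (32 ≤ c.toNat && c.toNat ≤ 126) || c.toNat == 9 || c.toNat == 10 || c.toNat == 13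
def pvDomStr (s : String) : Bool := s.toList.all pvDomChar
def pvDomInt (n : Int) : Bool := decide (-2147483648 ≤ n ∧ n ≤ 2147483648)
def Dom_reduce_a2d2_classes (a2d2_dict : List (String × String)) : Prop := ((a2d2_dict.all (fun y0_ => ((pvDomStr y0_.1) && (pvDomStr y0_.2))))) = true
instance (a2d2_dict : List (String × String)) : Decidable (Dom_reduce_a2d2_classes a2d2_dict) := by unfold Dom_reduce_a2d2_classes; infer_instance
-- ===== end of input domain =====

-- B replaces A's seen-list pass by a worklist nub: map items to (first-word, key) pairs, repeatedly pop the head and filter its word out of the tail, then build the dict once (objective: alternative).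

-- first word of a value: value.split(" ")[0]  (always defined: split with a non-empty separator never returns an empty list)
def pvFirstWord (v : String) : String := PySem.List.pyGetD ((PySem.Str.split? v " ").getD []) 0 ""

-- ===== PORT A =====
def reduce_a2d2_classes (a2d2_dict : List (String × String)) : List (String × String) :=
  (a2d2_dict.foldl
    (fun (s : List String × PySem.Dict String String) kv =>
      let o := pvFirstWord kv.2
      if o ∈ s.1 then s else (s.1 ++ [o], s.2.insert o kv.1))
    ([], PySem.Dict.empty)).2.items

-- ===== PORT B =====
-- the while loop: pop the head (word, key) pair onto out, drop later pairs with the same word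
def pvLoopB : List (String × String) → List (String × String) → List (String × String)
  | [], out => out
  | wk :: rest, out =>
    pvLoopB (rest.filter (fun p => p.1 != wk.1)) (out ++ [(wk.1, wk.2)])
termination_by work _ => work.length
decreasing_by
  simp only [List.length_unattach, List.length_cons, Nat.lt_succ_iff]
  exact le_trans (List.length_filter_le _ _) (le_of_eq List.length_attach)

def reduce_a2d2_classes_alt (a2d2_dict : List (String × String)) : List (String × String) :=
  (PySem.Dict.ofList
    (pvLoopB (a2d2_dict.map (fun kv => (pvFirstWord kv.2, kv.1))) [])
    : PySem.Dict String String).items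

-- ===== PRECONDITION & SPEC =====
def Spec_reduce_a2d2_classes (a2d2_dict : List (String × String)) (out : List (String × String)) : Prop := out = reduce_a2d2_classes_alt a2d2_dict
instance (a2d2_dict : List (String × String)) (out : List (String × String)) : Decidable (Spec_reduce_a2d2_classes a2d2_dict out) := by unfold Spec_reduce_a2d2_classes; infer_instance

-- ===== CLAIM (what is proved, stated in full; the proofs are below) =====
def Claim_equal_reduce_a2d2_classes : Prop := ∀ (a2d2_dict : List (String × String)), Dom_reduce_a2d2_classes a2d2_dict → Spec_reduce_a2d2_classes a2d2_dict (reduce_a2d2_classes a2d2_dict)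

-- ===== LEMMAS AND PROOFS =====

-- proof-side recursion: the (word, key) pairs pvLoopB accumulates, without the accumulator
def pvGoB : List (String × String) → List (String × String)
  | [] => []
  | kv :: rest =>
    (pvFirstWord kv.2, kv.1) ::
      pvGoB (rest.filter (fun p => pvFirstWord p.2 != pvFirstWord kv.2))
termination_by l => l.length
decreasing_by
  simp only [List.length_unattach, List.length_cons, Nat.lt_succ_iff]
  exact le_trans (List.length_filter_le _ _) (le_of_eq List.length_attach)

-- the while loop on the premapped work list is pvGoB appended to the accumulator
theorem pvLoopB_eq_goB : ∀ (l : List (String × String)) (out : List (String × String)),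
    pvLoopB (l.map (fun kv => (pvFirstWord kv.2, kv.1))) out = out ++ pvGoB l
  | [], out => by simp [pvLoopB.eq_1, pvGoB.eq_1]
  | kv :: t, out => by
    rw [List.map_cons, pvLoopB.eq_2, pvGoB.eq_2]
    have hc : (t.map (fun kv => (pvFirstWord kv.2, kv.1))).filter
          (fun p => p.1 != pvFirstWord kv.2)
        = (t.filter (fun p => pvFirstWord p.2 != pvFirstWord kv.2)).map
            (fun kv => (pvFirstWord kv.2, kv.1)) := by
      rw [List.filter_map]
      rfl
    rw [hc, pvLoopB_eq_goB (t.filter (fun p => pvFirstWord p.2 != pvFirstWord kv.2))]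
    simp
termination_by l _ => l.length
decreasing_by simp only [List.length_cons, Nat.lt_succ_iff]; exact List.length_filter_le _ _

-- every first component produced by pvGoB is the first word of some input value
theorem pvGoB_fst_mem : ∀ (l : List (String × String)), ∀ q ∈ pvGoB l, ∃ p ∈ l, q.1 = pvFirstWord p.2
  | [] => by simp [pvGoB.eq_1]
  | kv :: rest => by
    intro q hq
    rw [pvGoB.eq_2] at hq
    simp only [List.mem_cons] at hq
    rcases hq with h | h
    · exact ⟨kv, by simp, by simp [h]⟩
    · obtain ⟨p, hp, hq⟩ := pvGoB_fst_mem _ q h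
      exact ⟨p, List.mem_cons_of_mem _ (List.mem_of_mem_filter hp), hq⟩
termination_by l => l.length
decreasing_by simp only [List.length_cons, Nat.lt_succ_iff]; exact List.length_filter_le _ _

-- the words pvGoB emits are pairwise distinct
theorem pvGoB_fst_nodup : ∀ (l : List (String × String)), ((pvGoB l).map Prod.fst).Nodup
  | [] => by simp [pvGoB.eq_1]
  | kv :: rest => by
    rw [pvGoB.eq_2]
    simp only [List.map_cons, List.nodup_cons]
    refine ⟨?_, pvGoB_fst_nodup _⟩
    intro hmem
    obtain ⟨q, hq, hfst⟩ := List.mem_map.mp hmem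
    obtain ⟨p, hp, hpw⟩ := pvGoB_fst_mem _ q hq
    have := List.of_mem_filter hp
    simp only [bne_iff_ne, ne_eq] at this
    exact this (by rw [← hpw, hfst])
termination_by l => l.length
decreasing_by simp only [List.length_cons, Nat.lt_succ_iff]; exact List.length_filter_le _ _

-- loop invariant for A: with the seen-list equal to the dict's keys, the fold appends
-- exactly the pairs pvGoB produces on the not-yet-seen part of the list
theorem pv_afold_items (l : List (String × String)) (seen : List String)
    (d : PySem.Dict String String) (h : d.keys = seen) :
    ((l.foldl
        (fun (s : List String × PySem.Dict String String) kv =>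
          let o := pvFirstWord kv.2
          if o ∈ s.1 then s else (s.1 ++ [o], s.2.insert o kv.1))
        (seen, d)).2).items
      = d.items ++ pvGoB (l.filter (fun p => decide (pvFirstWord p.2 ∉ seen))) := by
  induction l generalizing seen d with
  | nil => simp [pvGoB.eq_1]
  | cons kv t ih =>
    simp only [List.foldl_cons, List.filter_cons]
    by_cases hmem : pvFirstWord kv.2 ∈ seen
    · simpa [hmem] using ih seen d h
    · have hc : d.contains (pvFirstWord kv.2) = false := by
        rw [Bool.eq_false_iff]
        intro hcc
        exact hmem (h ▸ (PySem.Dict.contains_iff_mem_keys d _).mp hcc)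
      have hkeys : (d.insert (pvFirstWord kv.2) kv.1).keys = seen ++ [pvFirstWord kv.2] := by
        rw [PySem.Dict.keys_insert_of_not_contains d kv.1 hc, h]
      have hitems := PySem.Dict.items_insert_of_not_contains d kv.1 hc
      have ht := ih (seen ++ [pvFirstWord kv.2]) (d.insert (pvFirstWord kv.2) kv.1) hkeys
      rw [hitems] at ht
      have hfilter :
          t.filter (fun p => decide (pvFirstWord p.2 ∉ seen ++ [pvFirstWord kv.2]))
            = (t.filter (fun p => decide (pvFirstWord p.2 ∉ seen))).filter
                (fun p => pvFirstWord p.2 != pvFirstWord kv.2) := by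
        rw [List.filter_filter]
        apply List.filter_congr
        intro p _
        simp only [List.mem_append, List.mem_singleton]
        by_cases h1 : pvFirstWord p.2 ∈ seen <;> by_cases h2 : pvFirstWord p.2 = pvFirstWord kv.2 <;>
          simp [h1, h2]
      simp only [decide_not] at ht hfilter ⊢
      rw [hfilter] at ht
      simp only [hmem, if_false, decide_false, Bool.not_false, if_true]
      rw [ht, pvGoB.eq_2]
      simp

-- ===== VERDICT (by name: the statement is the Claim_ definition above) =====
theorem reduce_a2d2_classes_spec : Claim_equal_reduce_a2d2_classes := by
  intro l _
  unfold Spec_reduce_a2d2_classes reduce_a2d2_classes reduce_a2d2_classes_alt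
  rw [pvLoopB_eq_goB, List.nil_append]
  have ha := pv_afold_items l [] PySem.Dict.empty rfl
  simp only [List.not_mem_nil, not_false_iff, decide_true, List.filter_true] at ha
  rw [ha]
  have hb := PySem.Dict.items_foldl_insert_fresh (pvGoB l) Prod.fst Prod.snd
      (PySem.Dict.empty : PySem.Dict String String)
      (fun a _ => by simp [PySem.Dict.contains_empty]) (pvGoB_fst_nodup l)
  simp only [PySem.Dict.ofList, PySem.Dict.update]
  rw [show (fun (acc : PySem.Dict String String) (p : String × String) => acc.insert p.1 p.2)
        = (fun d a => d.insert (Prod.fst a) (Prod.snd a)) from rfl, hb]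
  simp
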